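-- pv_equiv track=rewrite | github.com/jbperin/hello-world | retro/optim_asm.py | opt_remove_double_jumps
-- ===== SOURCE A (Python) =====
-- def opt_remove_double_jumps(instructions):
--     """Exemple : supprime les 'jmp' qui pointent directement sur un autre 'jmp'."""
--     new_instrs = []
--     for i, instr in enumerate(instructions):
--         if instr["type"] == "terminal_jmp":
--             # vérifier si le label visé est immédiatement un autre jmp
--             if i + 1 < len(instructions):
--                 next_instr = instructions[i + 1]
--                 if next_instr["type"] == "terminal_jmp":
--                     # on saute celui-ci
--                     continue
--         new_instrs.append(instr)
--     return new_instrs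
-- ===== SOURCE B (Python) =====
-- def opt_remove_double_jumps(instructions):
--     """Reverse single pass: drop a terminal_jmp whose successor was a terminal_jmp."""
--     result = []
--     next_was_jmp = False
--     for instr in reversed(instructions):
--         is_jmp = instr["type"] == "terminal_jmp"
--         if not (is_jmp and next_was_jmp):
--             result.append(instr)
--         next_was_jmp = is_jmp
--     result.reverse()
--     return result
-- ===== Notes on version B (the rewrite author's own statement) =====
-- stated objective: alternative
-- what changed: Replaced the forward loop with enumerate and instructions[i+1] index lookahead by a reverse single pass that carries a next_was_jmp boolean flag, so no positional indexing or length test is needed.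
import Mathlib
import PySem

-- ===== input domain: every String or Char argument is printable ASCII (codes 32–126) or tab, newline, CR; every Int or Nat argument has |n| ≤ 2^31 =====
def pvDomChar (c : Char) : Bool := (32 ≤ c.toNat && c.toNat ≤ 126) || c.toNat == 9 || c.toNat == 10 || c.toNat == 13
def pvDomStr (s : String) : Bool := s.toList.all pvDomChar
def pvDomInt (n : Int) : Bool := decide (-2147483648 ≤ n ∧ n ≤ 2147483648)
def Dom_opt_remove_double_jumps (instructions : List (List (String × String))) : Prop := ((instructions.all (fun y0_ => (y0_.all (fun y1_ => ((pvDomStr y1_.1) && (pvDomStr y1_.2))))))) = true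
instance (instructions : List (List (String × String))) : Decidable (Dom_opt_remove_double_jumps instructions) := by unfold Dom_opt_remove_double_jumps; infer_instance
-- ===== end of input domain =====

-- B replaces A's forward loop with index lookahead by a reverse single pass carrying a boolean flag; same O(n) cost.


-- instr["type"]: first-match lookup in the association list (some _ under Pre_)
def pvType (instr : List (String × String)) : Option String := List.lookup "type" instr

-- ===== PORT A =====
-- forward loop over enumerate(instructions) with instructions[i+1] lookahead
def opt_remove_double_jumps (instructions : List (List (String × String))) : List (List (String × String)) :=
  (PySem.List.enumerate instructions).foldl (fun new_instrs p =>
    if pvType p.2 == some "terminal_jmp" then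
      if p.1 + 1 < (instructions.length : Int) then
        match PySem.List.pyGet? instructions (p.1 + 1) with
        | some next_instr =>
          if pvType next_instr == some "terminal_jmp" then new_instrs  -- continue
          else new_instrs ++ [p.2]
        | none => new_instrs ++ [p.2]  -- unreachable: the guard proves the index is in range
      else new_instrs ++ [p.2]
    else new_instrs ++ [p.2]) []

-- ===== PORT B =====
-- reverse single pass with the next_was_jmp flag, then reverse back
def opt_remove_double_jumps_alt (instructions : List (List (String × String))) : List (List (String × String)) :=
  let st := instructions.reverse.foldl
    (fun (st : List (List (String × String)) × Bool) instr =>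
      let is_jmp := pvType instr == some "terminal_jmp"
      ((if !(is_jmp && st.2) then st.1 ++ [instr] else st.1), is_jmp))
    ([], false)
  st.1.reverse

-- ===== PRECONDITION & SPEC =====
-- Pre_ excludes exactly the inputs on which Python A (and B) raises KeyError: an instruction without a "type" key.
def Pre_opt_remove_double_jumps (instructions : List (List (String × String))) : Prop :=
  ∀ instr ∈ instructions, (List.lookup "type" instr).isSome = true
instance (instructions : List (List (String × String))) : Decidable (Pre_opt_remove_double_jumps instructions) := by unfold Pre_opt_remove_double_jumps; infer_instance
def pvWitness_opt_remove_double_jumps : (List (List (String × String))) :=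
  [[("type", "terminal_jmp")], [("type", "mov")], [("type", "terminal_jmp")], [("type", "terminal_jmp")]]
def Spec_opt_remove_double_jumps (instructions : List (List (String × String))) (out : List (List (String × String))) : Prop := out = opt_remove_double_jumps_alt instructions
instance (instructions : List (List (String × String))) (out : List (List (String × String))) : Decidable (Spec_opt_remove_double_jumps instructions out) := by unfold Spec_opt_remove_double_jumps; infer_instance

-- ===== CLAIM (what is proved, stated in full; the proofs are below) =====
def Claim_equal_opt_remove_double_jumps : Prop := ∀ (instructions : List (List (String × String))), Dom_opt_remove_double_jumps instructions → Pre_opt_remove_double_jumps instructions → Spec_opt_remove_double_jumps instructions (opt_remove_double_jumps instructions)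

-- ===== LEMMAS AND PROOFS =====

-- canonical pairwise description shared by both proofs
def pvFlag (l : List (List (String × String))) : Bool :=
  match l with
  | [] => false
  | y :: _ => pvType y == some "terminal_jmp"

def pvG : List (List (String × String)) → List (List (String × String))
  | [] => []
  | x :: rest =>
    if (pvType x == some "terminal_jmp") && pvFlag rest then pvG rest else x :: pvG rest

theorem altB_eq_pvG_aux (l : List (List (String × String))) :
    l.reverse.foldl
      (fun (st : List (List (String × String)) × Bool) instr =>
        let is_jmp := pvType instr == some "terminal_jmp"
        ((if !(is_jmp && st.2) then st.1 ++ [instr] else st.1), is_jmp))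
      ([], false) = ((pvG l).reverse, pvFlag l) := by
  induction l with
  | nil => simp [pvG, pvFlag]
  | cons x rest ih =>
    rw [List.reverse_cons, List.foldl_append, ih]
    simp only [List.foldl_cons, List.foldl_nil]
    have hflag : pvFlag (x :: rest) = (pvType x == some "terminal_jmp") := rfl
    have hG : pvG (x :: rest)
        = if (pvType x == some "terminal_jmp") && pvFlag rest then pvG rest else x :: pvG rest := rfl
    rw [hflag, hG]
    cases ((pvType x == some "terminal_jmp") && pvFlag rest) with
    | false => simp
    | true => simp


theorem altB_eq_pvG (l : List (List (String × String))) :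
    opt_remove_double_jumps_alt l = pvG l := by
  unfold opt_remove_double_jumps_alt
  rw [altB_eq_pvG_aux]
  simp

theorem aA_eq_pvG_aux (xs : List (List (String × String))) :
    ∀ (l : List (List (String × String))) (k : Nat) (acc : List (List (String × String))),
      xs.drop k = l →
      (PySem.List.enumerate l (k : Int)).foldl (fun new_instrs p =>
        if pvType p.2 == some "terminal_jmp" then
          if p.1 + 1 < (xs.length : Int) then
            match PySem.List.pyGet? xs (p.1 + 1) with
            | some next_instr =>
              if pvType next_instr == some "terminal_jmp" then new_instrs
              else new_instrs ++ [p.2]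
            | none => new_instrs ++ [p.2]
          else new_instrs ++ [p.2]
        else new_instrs ++ [p.2]) acc = acc ++ pvG l := by
  intro l
  induction l with
  | nil => intro k acc _; simp [PySem.List.enumerate, pvG]
  | cons x rest ih =>
    intro k acc hk
    have hdrop : xs.drop (k + 1) = rest := by
      rw [← List.drop_drop, hk]; rfl
    have hklen : k < xs.length := by
      by_contra h
      have : xs.drop k = [] := List.drop_eq_nil_of_le (by omega)
      rw [hk] at this; exact absurd this (by simp)
    have hlen : (xs.drop k).length = xs.length - k := List.length_drop ..
    rw [hk] at hlen
    rw [PySem.List.enumerate_cons, List.foldl_cons]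
    have hcast : ((k : Int) + 1) = ((k + 1 : Nat) : Int) := by push_cast; ring
    rw [hcast, ih (k + 1) _ hdrop]
    -- evaluate the step on (k, x)
    by_cases hj : pvType x == some "terminal_jmp"
    · cases rest with
      | nil =>
        have hguard : ¬ (((k : Nat) : Int) + 1 < (xs.length : Int)) := by
          simp at hlen; omega
        simp [hguard, pvG, pvFlag, hj]
      | cons y rest' =>
        have hguard : ((k : Nat) : Int) + 1 < (xs.length : Int) := by
          simp at hlen; omega
        have hget : PySem.List.pyGet? xs (((k : Nat) : Int) + 1) = some y := by
          rw [hcast, PySem.List.pyGet?_natCast, ← List.head?_drop, hdrop]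
          rfl
        by_cases hy : (pvType y == some "terminal_jmp") = true
        · simp [hj, hguard, hget, hy, pvG, pvFlag]
        · simp [hj, hguard, hget, hy, pvG, pvFlag]
    · simp [hj, pvG, pvFlag]

theorem aA_eq_pvG (xs : List (List (String × String))) :
    opt_remove_double_jumps xs = pvG xs := by
  unfold opt_remove_double_jumps
  have := aA_eq_pvG_aux xs xs 0 [] (by simp)
  simpa using this

-- ===== VERDICT (by name: the statement is the Claim_ definition above) =====
theorem opt_remove_double_jumps_spec : Claim_equal_opt_remove_double_jumps := by
  intro instructions _ _
  unfold Spec_opt_remove_double_jumps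
  rw [aA_eq_pvG, altB_eq_pvG]
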